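-- pv_equiv track=rewrite | github.com/seantw0301/aiserver2 | remove/common_i_p.py | _find_room_earliest_time_improved
-- ===== SOURCE A (Python) =====
-- from typing import Dict, List, Optional
--
-- def _find_room_earliest_time_improved(room_array: List[int], time_slots: List[str],
--                                      start_index: int, required_slots: int) -> Dict:
--     """
--     改進版：為單個房間找最早可用時間
--
--     邏輯：
--     1. 從start_index開始檢查每個時段
--     2. 找到可用時段時設為開始時間，累加可用分鐘數
--     3. 遇到占用時段時重置計數器
--     4. 達到required_slots時返回開始時間
--     """
--     current_start_index = None
--     available_minutes = 0
--
--     for i in range(start_index, len(room_array)):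
--         is_available = (room_array[i] == 0)  # 0=可用, 1=占用
--
--         if is_available:
--             if current_start_index is None:
--                 # 設置開始時間
--                 current_start_index = i
--                 available_minutes = 5
--             else:
--                 # 累加可用分鐘數
--                 available_minutes += 5
--
--             # 檢查是否滿足所需時間
--             if available_minutes >= required_slots * 5:
--                 return {"earliest_time": time_slots[current_start_index]}
--         else:
--             # 遇到占用時段，重置計數器
--             current_start_index = None
--             available_minutes = 0
--
--     return {"earliest_time": None}
-- ===== SOURCE B (Python) =====
-- from typing import Dict, List, Optional
--
-- def _find_room_earliest_time_improved(room_array: List[int], time_slots: List[str],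
--                                       start_index: int, required_slots: int) -> Dict:
--     """Run-based: slice off the tail, find each maximal run of free (0) slots,
--     and return the start of the first run long enough."""
--     seg = room_array[start_index:]
--     n = len(seg)
--     i = 0
--     while i < n:
--         if seg[i] == 0:
--             j = i
--             while j < n and seg[j] == 0:
--                 j += 1
--             if j - i >= required_slots:
--                 return {"earliest_time": time_slots[start_index + i]}
--             i = j
--         else:
--             i += 1
--     return {"earliest_time": None}
-- ===== Notes on version B (the rewrite author's own statement) =====
-- stated objective: alternative
-- what changed: Replaces A's single scan with an accumulator that counts available minutes and resets on busy slots by a run decomposition: slice from start_index, locate each maximal run of free (0) slots with an inner scan, and return the start of the first run whose length reaches required_slots.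
-- outside the precondition, e.g. on _find_room_earliest_time_improved([0, 0], ['a', 'b'], -1, 2): A returns {'earliest_time': 'b'}, B returns {'earliest_time': None}
import Mathlib
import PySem

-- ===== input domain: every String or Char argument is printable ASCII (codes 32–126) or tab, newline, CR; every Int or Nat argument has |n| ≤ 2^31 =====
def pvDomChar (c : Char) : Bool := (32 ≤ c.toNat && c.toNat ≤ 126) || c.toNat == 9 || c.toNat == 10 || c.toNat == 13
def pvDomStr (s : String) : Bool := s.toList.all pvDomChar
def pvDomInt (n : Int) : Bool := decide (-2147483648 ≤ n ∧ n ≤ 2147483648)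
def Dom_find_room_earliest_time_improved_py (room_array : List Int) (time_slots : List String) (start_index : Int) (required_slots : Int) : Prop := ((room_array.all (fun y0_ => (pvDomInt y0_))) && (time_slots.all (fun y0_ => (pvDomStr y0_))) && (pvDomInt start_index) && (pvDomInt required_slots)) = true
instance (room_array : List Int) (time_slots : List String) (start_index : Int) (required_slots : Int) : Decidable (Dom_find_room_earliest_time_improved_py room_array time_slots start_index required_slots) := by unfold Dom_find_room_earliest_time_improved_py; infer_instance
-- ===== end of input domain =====

-- B replaces A's reset-on-busy accumulator by a run decomposition of the sliced tail (alternative, same cost).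

-- ===== PORT A =====
-- A's for-loop over range(start_index, len(room_array)) with state (current_start_index, available_minutes);
-- early `return` becomes the result of the recursion.  room_array[i] / time_slots[c] are in range on Pre_;
-- pyGetD's default is never used there.
def pvALoop (room : List Int) (ts : List String) (rs : Int) :
    List Int → Option Int → Int → List (String × Option String)
  | [], _, _ => [("earliest_time", none)]
  | i :: rest, cur, mins =>
    if PySem.List.pyGetD room i 0 = 0 then
      match cur with
      | none =>
        if (5 : Int) ≥ rs * 5 then [("earliest_time", some (PySem.List.pyGetD ts i ""))]
        else pvALoop room ts rs rest (some i) 5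
      | some c =>
        if mins + 5 ≥ rs * 5 then [("earliest_time", some (PySem.List.pyGetD ts c ""))]
        else pvALoop room ts rs rest (some c) (mins + 5)
    else pvALoop room ts rs rest none 0

def find_room_earliest_time_improved_py (room_array : List Int) (time_slots : List String) (start_index : Int) (required_slots : Int) : List (String × Option String) :=
  pvALoop room_array time_slots required_slots
    (PySem.List.pyRange start_index (room_array.length : Int) 1) none 0

-- ===== PORT B =====
-- Source B: seg = room_array[start_index:]; outer while advances i, inner while finds the run end j.
def pvRunEnd (seg : List Int) (j : Nat) : Nat :=
  if h : j < seg.length ∧ seg.getD j 1 = 0 then pvRunEnd seg (j + 1) else j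
  termination_by seg.length - j
  decreasing_by omega

lemma pvRunEnd_gt (seg : List Int) (i : Nat) (h1 : i < seg.length) (h2 : seg.getD i 1 = 0) :
    i < pvRunEnd seg i := by
  rw [pvRunEnd]
  have hle : ∀ N t, seg.length ≤ t + N → t ≤ pvRunEnd seg t := by
    intro N
    induction N with
    | zero => intro t ht; rw [pvRunEnd]; split <;> omega
    | succ N ih =>
      intro t ht; rw [pvRunEnd]; split
      · exact le_trans (by omega) (ih (t + 1) (by omega))
      · exact le_rfl
  simp only [h1, h2, and_self, dite_true]
  exact lt_of_lt_of_le (Nat.lt_succ_self i) (hle seg.length (i + 1) (by omega))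

def pvBLoop (seg : List Int) (ts : List String) (start rs : Int) (i : Nat) :
    List (String × Option String) :=
  if hi : i < seg.length then
    if hz : seg.getD i 1 = 0 then
      let j := pvRunEnd seg i
      if (j : Int) - (i : Int) ≥ rs then
        [("earliest_time", some (PySem.List.pyGetD ts (start + (i : Int)) ""))]
      else pvBLoop seg ts start rs j
    else pvBLoop seg ts start rs (i + 1)
  else [("earliest_time", none)]
  termination_by seg.length - i
  decreasing_by
  · have := pvRunEnd_gt seg i hi hz; omega
  · omega

def find_room_earliest_time_improved_py_alt (room_array : List Int) (time_slots : List String) (start_index : Int) (required_slots : Int) : List (String × Option String) :=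
  pvBLoop (PySem.List.slice room_array (some start_index) none) time_slots
    start_index required_slots 0

-- ===== PRECONDITION & SPEC =====
-- pvQual room start rs p: p is the start of a maximal free run of the scan [start, len) long
-- enough to satisfy the request (length ≥ max(rs, 1)).
def pvQual (room : List Int) (start rs : Int) (p : Nat) : Bool :=
  decide (start ≤ (p : Int) ∧ (p : Int) < (room.length : Int) ∧ room.getD p 1 = 0 ∧
    ((p : Int) = start ∨ room.getD (p - 1) 1 ≠ 0) ∧
    (p : Int) + max rs 1 ≤ (room.length : Int) ∧
    ∀ k ∈ List.range room.length, (p ≤ k ∧ (k : Int) < (p : Int) + max rs 1) → room.getD k 1 = 0)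

-- Pre_ excludes negative start_index, on which Python's negative-index semantics make A scan a
-- wrapped window while B slices, and the inputs whose first satisfiable run starts at an index
-- ≥ len(time_slots), on which A raises IndexError when indexing time_slots.
def Pre_find_room_earliest_time_improved_py (room_array : List Int) (time_slots : List String) (start_index : Int) (required_slots : Int) : Prop :=
  0 ≤ start_index ∧
    ∀ p ∈ List.range room_array.length,
      (pvQual room_array start_index required_slots p = true ∧
        ∀ q ∈ List.range p, ¬ pvQual room_array start_index required_slots q = true) →
      (p : Int) < (time_slots.length : Int)
instance (room_array : List Int) (time_slots : List String) (start_index : Int) (required_slots : Int) : Decidable (Pre_find_room_earliest_time_improved_py room_array time_slots start_index required_slots) := by unfold Pre_find_room_earliest_time_improved_py; infer_instance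

def pvWitness_find_room_earliest_time_improved_py : List Int × List String × Int × Int :=
  ([1, 0, 0, 1, 0], ["a", "b", "c", "d", "e"], 0, 2)

def Spec_find_room_earliest_time_improved_py (room_array : List Int) (time_slots : List String) (start_index : Int) (required_slots : Int) (out : List (String × Option String)) : Prop := out = find_room_earliest_time_improved_py_alt room_array time_slots start_index required_slots
instance (room_array : List Int) (time_slots : List String) (start_index : Int) (required_slots : Int) (out : List (String × Option String)) : Decidable (Spec_find_room_earliest_time_improved_py room_array time_slots start_index required_slots out) := by unfold Spec_find_room_earliest_time_improved_py; infer_instance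

-- ===== CLAIM (what is proved, stated in full; the proofs are below) =====
def Claim_equal_find_room_earliest_time_improved_py : Prop := ∀ (room_array : List Int) (time_slots : List String) (start_index : Int) (required_slots : Int), Dom_find_room_earliest_time_improved_py room_array time_slots start_index required_slots → Pre_find_room_earliest_time_improved_py room_array time_slots start_index required_slots → Spec_find_room_earliest_time_improved_py room_array time_slots start_index required_slots (find_room_earliest_time_improved_py room_array time_slots start_index required_slots)

-- ===== LEMMAS AND PROOFS =====

lemma pvGetD_drop (l : List Int) (s k : Nat) (d : Int) : (l.drop s).getD k d = l.getD (s + k) d := by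
  simp [List.getD_eq_getElem?_getD, List.getElem?_drop]

lemma pvGetD01 (l : List Int) (m : Nat) (h : m < l.length) : l.getD m 0 = l.getD m 1 := by
  rw [List.getD_eq_getElem _ _ h, List.getD_eq_getElem _ _ h]

lemma pvRunEnd_le (seg : List Int) : ∀ N t, seg.length ≤ t + N → t ≤ seg.length → pvRunEnd seg t ≤ seg.length := by
  intro N
  induction N with
  | zero => intro t h1 h2; rw [pvRunEnd]; split <;> omega
  | succ N ih =>
    intro t h1 h2; rw [pvRunEnd]; split
    · exact ih (t + 1) (by omega) (by omega)
    · exact h2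

lemma pvRunEnd_zeros (seg : List Int) : ∀ N t, seg.length ≤ t + N → ∀ m, t ≤ m → m < pvRunEnd seg t → seg.getD m 1 = 0 := by
  intro N
  induction N with
  | zero =>
    intro t h1 m hm1 hm2
    rw [pvRunEnd] at hm2; rw [dif_neg (by omega)] at hm2; omega
  | succ N ih =>
    intro t h1 m hm1 hm2
    rw [pvRunEnd] at hm2
    by_cases hc : t < seg.length ∧ seg.getD t 1 = 0
    · rw [dif_pos hc] at hm2
      rcases Nat.eq_or_lt_of_le hm1 with h | h
      · exact h ▸ hc.2
      · exact ih (t + 1) (by omega) m (by omega) hm2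
    · rw [dif_neg hc] at hm2; omega

lemma pvRunEnd_end (seg : List Int) : ∀ N t, seg.length ≤ t + N → pvRunEnd seg t < seg.length → seg.getD (pvRunEnd seg t) 1 ≠ 0 := by
  intro N
  induction N with
  | zero =>
    intro t h1 h2
    rw [pvRunEnd] at h2 ⊢; rw [dif_neg (by omega)] at h2 ⊢; omega
  | succ N ih =>
    intro t h1 h2
    rw [pvRunEnd] at h2 ⊢
    by_cases hc : t < seg.length ∧ seg.getD t 1 = 0
    · rw [dif_pos hc] at h2 ⊢; exact ih (t + 1) (by omega) h2
    · rw [dif_neg hc] at h2 ⊢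
      intro hz; exact hc ⟨h2, hz⟩

-- A's loop arriving at a blocked (or past-the-end) position behaves as if its state were fresh.
lemma pvA_blocked (room : List Int) (ts : List String) (rs : Int) (c mins : Int) (jab : Nat)
    (hjL : jab ≤ room.length) (hend : jab < room.length → room.getD jab 0 ≠ 0) :
    pvALoop room ts rs (PySem.List.pyRange (jab : Int) (room.length : Int) 1) (some c) mins
      = pvALoop room ts rs (PySem.List.pyRange (jab : Int) (room.length : Int) 1) none 0 := by
  rcases Nat.eq_or_lt_of_le hjL with h | h
  · have hr : PySem.List.pyRange (jab : Int) (room.length : Int) 1 = [] := by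
      rw [PySem.List.pyRange_one]
      have : ((room.length : Int) - (jab : Int)).toNat = 0 := by omega
      simp [this]
    rw [hr]
    rfl
  · rw [PySem.List.pyRange_one_cons (by exact_mod_cast h)]
    simp only [pvALoop, PySem.List.pyGetD_natCast]
    rw [if_neg (hend h), if_neg (hend h)]

-- Inside a maximal zero-run [i, jab), A with state (some i, (k-i)*5) either triggers within the
-- run (iff the run is long enough) or leaves it fresh at jab.
lemma pvA_run (room : List Int) (ts : List String) (rs : Int) (i jab : Nat)
    (hjL : jab ≤ room.length)
    (hz : ∀ m, i ≤ m → m < jab → room.getD m 0 = 0)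
    (hend : jab < room.length → room.getD jab 0 ≠ 0) :
    ∀ N k, i < k → k ≤ jab → jab ≤ k + N → (k : Int) - (i : Int) < rs →
      pvALoop room ts rs (PySem.List.pyRange (k : Int) (room.length : Int) 1) (some (i : Int)) (((k : Int) - (i : Int)) * 5)
        = if (jab : Int) - (i : Int) ≥ rs then [("earliest_time", some (ts.getD i ""))]
          else pvALoop room ts rs (PySem.List.pyRange (jab : Int) (room.length : Int) 1) none 0 := by
  intro N
  induction N with
  | zero =>
    intro k h1 h2 h3 h4
    have hkj : k = jab := by omega
    subst hkj
    rw [if_neg (by omega)]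
    exact pvA_blocked room ts rs _ _ k hjL hend
  | succ N ih =>
    intro k h1 h2 h3 h4
    rcases Nat.eq_or_lt_of_le h2 with hkj | hkj
    · subst hkj
      rw [if_neg (by omega)]
      exact pvA_blocked room ts rs _ _ k hjL hend
    · have hkL : (k : Int) < (room.length : Int) := by exact_mod_cast lt_of_lt_of_le hkj hjL
      rw [PySem.List.pyRange_one_cons hkL]
      simp only [pvALoop, PySem.List.pyGetD_natCast]
      rw [if_pos (hz k (by omega) (by omega))]
      by_cases htr : ((k : Int) - (i : Int)) * 5 + 5 ≥ rs * 5
      · rw [if_pos htr, if_pos (by omega)]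
      · rw [if_neg htr]
        have hcast : (k : Int) + 1 = ((k + 1 : Nat) : Int) := by push_cast; ring
        have hmins : ((k : Int) - (i : Int)) * 5 + 5 = (((k + 1 : Nat) : Int) - (i : Int)) * 5 := by
          push_cast; ring
        rw [hcast, hmins]
        exact ih (k + 1) (by omega) (by omega) (by omega) (by push_cast; omega)

-- Main invariant: A's scan started fresh at absolute index i equals B's run scan at relative
-- index i - s over the dropped segment.
lemma pvMain (room : List Int) (ts : List String) (rs : Int) (s : Nat) :
    ∀ N i, s ≤ i → room.length ≤ i + N →
      pvALoop room ts rs (PySem.List.pyRange (i : Int) (room.length : Int) 1) none 0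
        = pvBLoop (room.drop s) ts (s : Int) rs (i - s) := by
  intro N
  induction N with
  | zero =>
    intro i hsi hN
    have hrange : PySem.List.pyRange (i : Int) (room.length : Int) 1 = [] := by
      rw [PySem.List.pyRange_one]
      have : ((room.length : Int) - (i : Int)).toNat = 0 := by omega
      simp [this]
    rw [hrange, pvBLoop, dif_neg (by rw [List.length_drop]; omega)]
    rfl
  | succ N ih =>
    intro i hsi hN
    by_cases hiL : i < room.length
    · have hlen : (room.drop s).length = room.length - s := List.length_drop
      rw [PySem.List.pyRange_one_cons (by exact_mod_cast hiL)]
      simp only [pvALoop, PySem.List.pyGetD_natCast]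
      rw [pvBLoop, dif_pos (by omega)]
      by_cases hz0 : room.getD i 0 = 0
      · have hisz : s + (i - s) = i := by omega
        have hz1 : (room.drop s).getD (i - s) 1 = 0 := by
          rw [pvGetD_drop, hisz, ← pvGetD01 room i hiL]; exact hz0
        rw [if_pos hz0, dif_pos hz1]
        set j := pvRunEnd (room.drop s) (i - s) with hjdef
        have hjgt : i - s < j := pvRunEnd_gt (room.drop s) (i - s) (by omega) hz1
        have hjle : j ≤ (room.drop s).length :=
          pvRunEnd_le (room.drop s) (room.drop s).length (i - s) (by omega) (by omega)
        have hzabs : ∀ m, i ≤ m → m < s + j → room.getD m 0 = 0 := by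
          intro m hm1 hm2
          have h1 : (room.drop s).getD (m - s) 1 = 0 :=
            pvRunEnd_zeros (room.drop s) (room.drop s).length (i - s) (by omega) (m - s)
              (by omega) (by omega)
          rw [pvGetD_drop] at h1
          have : s + (m - s) = m := by omega
          rw [this] at h1
          rw [pvGetD01 room m (by omega)]
          exact h1
        have hendabs : s + j < room.length → room.getD (s + j) 0 ≠ 0 := by
          intro hlt
          have h1 : (room.drop s).getD j 1 ≠ 0 :=
            pvRunEnd_end (room.drop s) (room.drop s).length (i - s) (by omega) (by omega)
          rw [pvGetD_drop] at h1
          rw [pvGetD01 room (s + j) hlt]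
          exact h1
        have htsix : PySem.List.pyGetD ts ((s : Int) + ((i - s : Nat) : Int)) ""
            = ts.getD i "" := by
          rw [show (s : Int) + ((i - s : Nat) : Int) = ((i : Nat) : Int) by omega,
            PySem.List.pyGetD_natCast]
        by_cases h5 : (5 : Int) ≥ rs * 5
        · rw [if_pos h5, if_pos (by omega), htsix]
        · rw [if_neg h5]
          have hcast : (i : Int) + 1 = ((i + 1 : Nat) : Int) := by push_cast; ring
          have hmins : (5 : Int) = (((i + 1 : Nat) : Int) - (i : Int)) * 5 := by push_cast; ring
          rw [hcast, hmins,
            pvA_run room ts rs i (s + j) (by omega) hzabs hendabs (s + j) (i + 1)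
              (by omega) (by omega) (by omega) (by push_cast; omega)]
          have hfresh : pvALoop room ts rs (PySem.List.pyRange ((s + j : Nat) : Int) (room.length : Int) 1) none 0
              = pvBLoop (room.drop s) ts (s : Int) rs j := by
            have := ih (s + j) (by omega) (by omega)
            simpa [Nat.add_sub_cancel_left] using this
          by_cases hcond : (j : Int) - ((i - s : Nat) : Int) ≥ rs
          · rw [if_pos (by push_cast at hcond ⊢; omega), if_pos hcond, htsix]
          · rw [if_neg (by push_cast at hcond ⊢; omega), if_neg hcond, hfresh]
      · have hz1 : ¬ (room.drop s).getD (i - s) 1 = 0 := by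
          rw [pvGetD_drop]
          have : s + (i - s) = i := by omega
          rw [this, ← pvGetD01 room i hiL]
          exact hz0
        rw [if_neg hz0, dif_neg hz1]
        have hcast : (i : Int) + 1 = ((i + 1 : Nat) : Int) := by push_cast; ring
        rw [hcast]
        have := ih (i + 1) (by omega) (by omega)
        have hsub : i + 1 - s = i - s + 1 := by omega
        rw [hsub] at this
        exact this
    · have hrange : PySem.List.pyRange (i : Int) (room.length : Int) 1 = [] := by
        rw [PySem.List.pyRange_one]
        have : ((room.length : Int) - (i : Int)).toNat = 0 := by omega
        simp [this]
      rw [hrange, pvBLoop, dif_neg (by rw [List.length_drop]; omega)]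
      rfl

-- ===== VERDICT (by name: the statement is the Claim_ definition above) =====
theorem find_room_earliest_time_improved_py_spec : Claim_equal_find_room_earliest_time_improved_py := by
  intro room ts start rs _hDom hPre
  obtain hst := hPre.1
  unfold Spec_find_room_earliest_time_improved_py
  unfold find_room_earliest_time_improved_py find_room_earliest_time_improved_py_alt
  have hs : ((start.toNat : Nat) : Int) = start := Int.toNat_of_nonneg hst
  rw [← hs, PySem.List.slice_from_natCast]
  have := pvMain room ts rs start.toNat room.length start.toNat le_rfl (by omega)
  simpa using this
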